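-- pv_equiv track=rewrite | github.com/Yunjin0521/N-N-multiplier-generator | gen_topmultiplier.py | wrap_ident_list
-- ===== SOURCE A (Python) =====
-- def wrap_ident_list(prefix: str, idents, per_line=8, indent="  "):
--     lines = []
--     cur = []
--     for i, name in enumerate(idents, 1):
--         cur.append(name)
--         if i % per_line == 0:
--             lines.append(f"{indent}{prefix} {', '.join(cur)};")
--             cur = []
--     if cur:
--         lines.append(f"{indent}{prefix} {', '.join(cur)};")
--     return "\n".join(lines)
-- ===== SOURCE B (Python) =====
-- def wrap_ident_list(prefix: str, idents, per_line=8, indent="  "):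
--     items = list(idents)
--     lines = []
--     for start in range(0, len(items), per_line):
--         chunk = items[start:start + per_line]
--         lines.append(f"{indent}{prefix} {', '.join(chunk)};")
--     return "\n".join(lines)
-- ===== Notes on version B (the rewrite author's own statement) =====
-- stated objective: simpler
-- what changed: Replaces A's element-by-element accumulator with modulo-counter flushes and a trailing flush branch by a single stride loop over start indices (range(0, len, per_line)) that slices each chunk directly, so the remainder line falls out with no counter, no flush condition and no trailing branch.
-- outside the precondition, e.g. on wrap_ident_list('wire', ['a', 'b', 'c'], -2, ' '): A returns ' wire a, b;\n wire c;', B returns ''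
import Mathlib
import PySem

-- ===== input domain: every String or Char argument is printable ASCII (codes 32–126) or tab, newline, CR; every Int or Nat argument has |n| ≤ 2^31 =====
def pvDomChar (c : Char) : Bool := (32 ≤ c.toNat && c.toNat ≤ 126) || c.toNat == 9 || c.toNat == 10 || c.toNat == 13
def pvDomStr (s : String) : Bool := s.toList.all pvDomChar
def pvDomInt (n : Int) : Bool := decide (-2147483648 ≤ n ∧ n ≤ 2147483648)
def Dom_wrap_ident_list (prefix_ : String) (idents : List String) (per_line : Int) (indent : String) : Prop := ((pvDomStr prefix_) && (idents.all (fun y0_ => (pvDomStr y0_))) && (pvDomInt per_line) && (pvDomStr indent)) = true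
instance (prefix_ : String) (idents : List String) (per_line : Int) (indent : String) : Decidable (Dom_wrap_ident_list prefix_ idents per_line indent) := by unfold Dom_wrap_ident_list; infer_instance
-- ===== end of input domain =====

-- B replaces A's modulo-counter accumulate-and-flush loop with a stride loop over
-- start indices that slices each chunk directly (same result, simpler decomposition).

-- ===== PORT A =====
def wrap_ident_list (prefix_ : String) (idents : List String) (per_line : Int) (indent : String) : String :=
  -- lines = []; cur = []; for i, name in enumerate(idents, 1): …
  let st := (PySem.List.enumerate idents 1).foldl
    (fun (st : List String × List String) (p : Int × String) =>
      let cur := st.2 ++ [p.2]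
      if PySem.Int.mod p.1 per_line = 0 then
        (st.1 ++ [indent ++ prefix_ ++ " " ++ PySem.Str.join ", " cur ++ ";"], ([] : List String))
      else (st.1, cur))
    ([], [])
  -- if cur: lines.append(…)
  let lines := if st.2 = [] then st.1
    else st.1 ++ [indent ++ prefix_ ++ " " ++ PySem.Str.join ", " st.2 ++ ";"]
  PySem.Str.join "\n" lines

-- ===== PORT B =====
def wrap_ident_list_alt (prefix_ : String) (idents : List String) (per_line : Int) (indent : String) : String :=
  let items := idents
  let lines := (PySem.List.pyRange 0 (items.length : Int) per_line).map
    (fun start =>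
      let chunk := PySem.List.slice items (some start) (some (start + per_line))
      indent ++ prefix_ ++ " " ++ PySem.Str.join ", " chunk ++ ";")
  PySem.Str.join "\n" lines

-- ===== PRECONDITION & SPEC =====
-- Pre_ restricts per_line to the natural domain of positive group sizes: at per_line = 0
-- A raises ZeroDivisionError, and for negative per_line A's 'i % per_line == 0' test
-- accidentally chunks by |per_line| (an artefact of the modulo test) while B's range is empty.
def Pre_wrap_ident_list (prefix_ : String) (idents : List String) (per_line : Int) (indent : String) : Prop :=
  1 ≤ per_line
instance (prefix_ : String) (idents : List String) (per_line : Int) (indent : String) : Decidable (Pre_wrap_ident_list prefix_ idents per_line indent) := by unfold Pre_wrap_ident_list; infer_instance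
def pvWitness_wrap_ident_list : String × List String × Int × String :=
  ("input", ["a", "b", "c", "d", "e"], 2, "  ")
def Spec_wrap_ident_list (prefix_ : String) (idents : List String) (per_line : Int) (indent : String) (out : String) : Prop := out = wrap_ident_list_alt prefix_ idents per_line indent
instance (prefix_ : String) (idents : List String) (per_line : Int) (indent : String) (out : String) : Decidable (Spec_wrap_ident_list prefix_ idents per_line indent out) := by unfold Spec_wrap_ident_list; infer_instance

-- ===== CLAIM (what is proved, stated in full; the proofs are below) =====
def Claim_equal_wrap_ident_list : Prop := ∀ (prefix_ : String) (idents : List String) (per_line : Int) (indent : String), Dom_wrap_ident_list prefix_ idents per_line indent → Pre_wrap_ident_list prefix_ idents per_line indent → Spec_wrap_ident_list prefix_ idents per_line indent (wrap_ident_list prefix_ idents per_line indent)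

-- ===== LEMMAS AND PROOFS =====

-- `chunks k l` cuts `l` into consecutive groups of `k+1` elements (last may be shorter).
def chunks (k : Nat) : List String → List (List String)
  | [] => []
  | x :: xs => ((x :: xs).take (k+1)) :: chunks k ((x :: xs).drop (k+1))
termination_by l => l.length
decreasing_by simp

theorem chunks_nil (k : Nat) : chunks k [] = [] := by rw [chunks.eq_def]

theorem chunks_ne_nil (k : Nat) (l : List String) (h : l ≠ []) :
    chunks k l = l.take (k+1) :: chunks k (l.drop (k+1)) := by
  cases l with
  | nil => exact absurd rfl h
  | cons x xs => rw [chunks.eq_def]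

theorem chunks_short (k : Nat) (l : List String) (h : l.length ≤ k + 1) (h0 : l ≠ []) :
    chunks k l = [l] := by
  rw [chunks_ne_nil k l h0, List.take_of_length_le h, List.drop_eq_nil_of_le h, chunks_nil]

-- A's loop, generalized: running it from a state whose pending chunk `cur` has the
-- length dictated by the enumerate counter produces exactly the chunk lines of cur ++ l.
theorem loopA (f : List String → String) (k : Int) (hk : 1 ≤ k)
    (l : List String) :
    ∀ (cur lines : List String) (i : Int),
    (cur.length : Int) < k →
    PySem.Int.mod (i - 1) k = (cur.length : Int) →
    (let st := (PySem.List.enumerate l i).foldl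
        (fun (st : List String × List String) (p : Int × String) =>
          let c := st.2 ++ [p.2]
          if PySem.Int.mod p.1 k = 0 then (st.1 ++ [f c], ([] : List String)) else (st.1, c))
        (lines, cur)
     if st.2 = [] then st.1 else st.1 ++ [f st.2])
    = lines ++ (chunks (k - 1).toNat (cur ++ l)).map f := by
  induction l with
  | nil =>
    intro cur lines i _hlt _hmod
    simp only [PySem.List.enumerate_nil, List.foldl_nil, List.append_nil]
    by_cases hc : cur = []
    · subst hc; simp [chunks_nil]
    · rw [chunks_short (k - 1).toNat cur (by omega) hc]
      simp [hc]
  | cons a rest ih =>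
    intro cur lines i hlt hmod
    rw [PySem.List.enumerate_cons]
    simp only [List.foldl_cons]
    have hkpos : (0:Int) < k := by omega
    have hmod' : (i - 1) % k = (cur.length : Int) := by
      rw [← PySem.Int.mod_eq_emod_of_pos hkpos]; exact hmod
    have hq : i = k * ((i - 1) / k) + ((cur.length : Int) + 1) := by
      have := Int.ediv_add_emod (i - 1) k
      omega
    by_cases hfull : (cur.length : Int) + 1 = k
    · -- flush: i % k = 0
      have hmodi : PySem.Int.mod i k = 0 := by
        rw [PySem.Int.mod_eq_emod_of_pos hkpos, hq, hfull]
        simp [Int.add_mul_emod_self_left]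
      simp only [hmodi, reduceIte]
      have hnext : PySem.Int.mod (i + 1 - 1) k = (([] : List String).length : Int) := by
        rw [show i + 1 - 1 = i by ring, hmodi]; simp
      have := ih ([]) (lines ++ [f (cur ++ [a])]) (i + 1) (by simpa using hkpos) hnext
      simp only [List.nil_append] at this
      rw [this]
      have hsplit : cur ++ a :: rest = (cur ++ [a]) ++ rest := by simp
      have hlenc : (cur ++ [a]).length = (k - 1).toNat + 1 := by simp; omega
      rw [hsplit, chunks_ne_nil (k-1).toNat ((cur ++ [a]) ++ rest) (by simp),
          hlenc.symm, List.take_left, List.drop_left]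
      simp
    · -- no flush
      have hmodi : PySem.Int.mod i k = (cur.length : Int) + 1 := by
        rw [PySem.Int.mod_eq_emod_of_pos hkpos, hq,
            Int.add_comm (k * ((i - 1) / k)) _, Int.add_mul_emod_self_left]
        exact Int.emod_eq_of_lt (by omega) (by omega)
      simp only [hmodi]
      rw [if_neg (show ¬(((cur.length : Int)) + 1 = 0) by omega)]
      have hnext : PySem.Int.mod (i + 1 - 1) k = ((cur ++ [a]).length : Int) := by
        rw [show i + 1 - 1 = i by ring, hmodi]; simp
      have := ih (cur ++ [a]) lines (i + 1) (by simp; omega) hnext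
      rw [this]
      simp

-- pyRange with positive step and positive stop peels its head.
theorem pyRange_pos_cons (n k : Int) (hk : 0 < k) (hn : 0 < n) :
    PySem.List.pyRange 0 n k = 0 :: (PySem.List.pyRange 0 (n - k) k).map (· + k) := by
  rw [PySem.List.pyRange_of_pos 0 n hk, PySem.List.pyRange_of_pos 0 (n - k) hk]
  by_cases h : 0 < n - k
  · have hc : ((n - 0 + k - 1) / k).toNat = ((n - k - 0 + k - 1) / k).toNat + 1 := by
      have he : n - 0 + k - 1 = (n - k - 0 + k - 1) + 1 * k := by ring
      rw [he, Int.add_mul_ediv_right _ _ (by omega : k ≠ 0)]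
      have h1 : 0 ≤ (n - k - 0 + k - 1) / k := Int.ediv_nonneg (by omega) (by omega)
      omega
    rw [if_pos hn, if_pos h, hc, List.range_succ_eq_map]
    simp only [List.map_cons, List.map_map, Nat.cast_zero, Int.mul_zero, Int.add_zero]
    congr 1
    apply List.map_congr_left
    intro j _
    simp only [Function.comp_apply]
    push_cast
    ring
  · have h0 : (n - 1) / k = 0 := Int.ediv_eq_zero_of_lt (by omega) (by omega)
    have hc : (n - 0 + k - 1) / k = 1 := by
      have he : n - 0 + k - 1 = (n - 1) + 1 * k := by ring
      rw [he, Int.add_mul_ediv_right _ _ (by omega : k ≠ 0), h0]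
      omega
    rw [if_pos hn, if_neg h, hc]
    simp [List.range_succ]

-- B's stride-and-slice map produces the same chunk lines.
theorem mapB (f : List String → String) (k : Int) (hk : 1 ≤ k) :
    ∀ (n : Nat) (l : List String), l.length ≤ n →
    (PySem.List.pyRange 0 (l.length : Int) k).map
      (fun s => f (PySem.List.slice l (some s) (some (s + k))))
    = (chunks (k - 1).toNat l).map f := by
  have hk0 : (0:Int) < k := by omega
  intro n
  induction n with
  | zero =>
    intro l hl
    have hl0 : l.length = 0 := by omega
    have hnil : l = [] := List.length_eq_zero_iff.mp hl0
    subst hnil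
    simp [chunks_nil, PySem.List.pyRange_of_pos 0 0 hk0]
  | succ m ih =>
    intro l hl
    cases hL : l with
    | nil =>
      subst hL
      have h00 := PySem.List.pyRange_of_pos 0 0 hk0
      simp only [List.length_nil, Nat.cast_zero, h00]
      simp [chunks_nil]
    | cons x xs =>
      subst hL
      have hn : (0:Int) < ((x :: xs).length : Int) := by simp
      rw [pyRange_pos_cons _ k (by omega) hn, List.map_cons, List.map_map]
      simp only [Function.comp_def]
      have hhead : PySem.List.slice (x :: xs) (some 0) (some (0 + k)) = (x :: xs).take (k.toNat) := by
        rw [PySem.List.slice_toNat]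
        · simp
        · omega
        · omega
      have htail : ∀ s ∈ PySem.List.pyRange 0 (((x :: xs).length : Int) - k) k,
          f (PySem.List.slice (x :: xs) (some (s + k)) (some (s + k + k)))
          = f (PySem.List.slice ((x :: xs).drop k.toNat) (some s) (some (s + k))) := by
        intro s hs
        have hs0 : 0 ≤ s := by
          rw [PySem.List.pyRange_of_pos 0 _ hk0] at hs
          simp at hs
          obtain ⟨j, _, hj⟩ := hs
          rw [← hj]
          exact mul_nonneg (by omega) (Int.natCast_nonneg j)
        rw [PySem.List.slice_toNat, PySem.List.slice_toNat, List.drop_drop,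
            show (s + k + k).toNat - (s + k).toNat = (s + k).toNat - s.toNat by omega,
            show (s + k).toNat = k.toNat + s.toNat by omega]
        all_goals omega
      rw [List.map_congr_left htail]
      by_cases hbig : k < ((x :: xs).length : Int)
      · have hlen : (((x :: xs).drop k.toNat).length : Int) = ((x :: xs).length : Int) - k := by
          rw [List.length_drop]; omega
        rw [← hlen]
        rw [ih ((x :: xs).drop k.toNat) (by rw [List.length_drop]; omega)]
        rw [chunks_ne_nil (k-1).toNat (x :: xs) (by simp)]
        rw [List.map_cons, hhead]
        have : (k - 1).toNat + 1 = k.toNat := by omega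
        rw [this]
      · -- the whole list fits in one chunk
        have hempty : PySem.List.pyRange 0 (((x :: xs).length : Int) - k) k = [] := by
          rw [PySem.List.pyRange_of_pos 0 _ hk0]
          rw [if_neg (by omega)]
          simp
        rw [hempty, List.map_nil]
        rw [chunks_short (k-1).toNat (x :: xs) (by omega) (by simp)]
        rw [List.map_singleton, hhead]
        rw [List.take_of_length_le (show (x :: xs).length ≤ k.toNat by omega)]

-- ===== VERDICT (by name: the statement is the Claim_ definition above) =====
theorem wrap_ident_list_spec : Claim_equal_wrap_ident_list := by
  intro prefix_ idents per_line indent _hdom hpre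
  unfold Pre_wrap_ident_list at hpre
  show wrap_ident_list prefix_ idents per_line indent = wrap_ident_list_alt prefix_ idents per_line indent
  unfold wrap_ident_list wrap_ident_list_alt
  have hA := loopA (fun c => indent ++ prefix_ ++ " " ++ PySem.Str.join ", " c ++ ";")
    per_line hpre idents [] [] 1 (by simpa using hpre) (by simp [PySem.Int.mod])
  simp only [List.nil_append] at hA
  have hB := mapB (fun c => indent ++ prefix_ ++ " " ++ PySem.Str.join ", " c ++ ";")
    per_line hpre idents.length idents (le_refl _)
  simp only []
  rw [hA, hB]
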